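-- pv_equiv track=rewrite | github.com/whiplashoo/advent_of_code | 2021/day8.py | is_digit_2
-- ===== SOURCE A (Python) =====
-- def is_digit_2(string, signals):
--     others = set("abcdefg").difference(string)
--     for letter in others:
--         found = 0
--         for s in signals:
--             if letter in s:
--                 found += 1
--         if found == 9:
--             return True
--     return False
-- ===== SOURCE B (Python) =====
-- def is_digit_2(string, signals):
--     counts = {}
--     for s in signals:
--         for ch in dict.fromkeys(s):  # distinct letters of s, once each
--             counts[ch] = counts.get(ch, 0) + 1
--     return any(counts.get(ch, 0) == 9 for ch in set("abcdefg").difference(string))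
-- ===== Notes on version B (the rewrite author's own statement) =====
-- stated objective: alternative
-- what changed: B builds one frequency table of distinct letters over all signals in a single pass and then looks up each unlit letter, instead of A's per-letter rescan of the whole signal list; same asymptotic cost, no speed claim.
import Mathlib
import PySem

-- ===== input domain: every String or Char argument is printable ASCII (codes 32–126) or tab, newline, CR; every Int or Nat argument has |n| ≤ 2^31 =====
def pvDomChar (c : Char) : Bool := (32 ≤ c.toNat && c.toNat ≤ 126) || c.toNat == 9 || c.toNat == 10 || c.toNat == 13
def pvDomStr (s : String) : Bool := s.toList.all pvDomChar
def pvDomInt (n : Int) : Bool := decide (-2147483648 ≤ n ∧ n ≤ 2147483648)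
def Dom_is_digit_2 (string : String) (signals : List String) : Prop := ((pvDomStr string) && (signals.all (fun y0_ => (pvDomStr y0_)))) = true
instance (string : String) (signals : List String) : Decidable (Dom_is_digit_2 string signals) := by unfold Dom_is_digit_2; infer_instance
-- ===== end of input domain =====

-- Alternative decomposition: B aggregates a frequency table of distinct letters over all
-- signals in one pass, then looks up each unlit letter, instead of A's per-letter rescans.


-- ===== PORT A =====
-- others = set("abcdefg").difference(string); for each such letter count signals containing
-- it (early return on found == 9, rendered as List.any — the result is order-insensitive).
def is_digit_2 (string : String) (signals : List String) : Bool :=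
  let others : PySem.Set Char := PySem.Set.diff (PySem.Set.ofList "abcdefg".toList) string.toList
  others.any (fun letter =>
    (signals.foldl (fun found s => if s.toList.contains letter then found + 1 else found) (0 : Int)) == 9)

-- ===== PORT B =====
-- counts = {}; for s in signals: for ch in dict.fromkeys(s): counts[ch] = counts.get(ch,0)+1;
-- any(counts.get(ch,0) == 9 for ch in set("abcdefg").difference(string))
def is_digit_2_alt (string : String) (signals : List String) : Bool :=
  let counts : PySem.Dict Char Int :=
    signals.foldl (fun d s =>
      (PySem.List.dedup s.toList).foldl (fun d ch => d.insert ch (d.getD ch 0 + 1)) d)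
      PySem.Dict.empty
  (PySem.Set.diff (PySem.Set.ofList "abcdefg".toList) string.toList).any
    (fun ch => counts.getD ch 0 == 9)

-- ===== PRECONDITION & SPEC =====
def Spec_is_digit_2 (string : String) (signals : List String) (out : Bool) : Prop := out = is_digit_2_alt string signals
instance (string : String) (signals : List String) (out : Bool) : Decidable (Spec_is_digit_2 string signals out) := by unfold Spec_is_digit_2; infer_instance

-- ===== CLAIM (what is proved, stated in full; the proofs are below) =====
def Claim_equal_is_digit_2 : Prop := ∀ (string : String) (signals : List String), Dom_is_digit_2 string signals → Spec_is_digit_2 string signals (is_digit_2 string signals)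

-- ===== LEMMAS AND PROOFS =====

-- B's insert-of-get-plus-one step is exactly Dict.modify with default 0.
lemma insert_getD_eq_modify (d : PySem.Dict Char Int) (k : Char) :
    d.insert k (d.getD k 0 + 1) = d.modify k 0 (· + 1) := by
  simp [PySem.Dict.modify, PySem.Dict.insert, PySem.Dict.getD]

-- the counter built by B's two nested loops, looked up at ch, counts the signals containing ch
lemma counts_getD (signals : List String) (d : PySem.Dict Char Int) (ch : Char) :
    (signals.foldl (fun d s =>
        (PySem.List.dedup s.toList).foldl (fun d c => d.insert c (d.getD c 0 + 1)) d) d).getD ch 0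
      = d.getD ch 0 + (signals.countP (fun s => s.toList.contains ch) : Int) := by
  induction signals generalizing d with
  | nil => simp
  | cons s rest ih =>
    simp only [List.foldl_cons, ih, List.countP_cons]
    have hstep : ∀ (l : List Char) (d : PySem.Dict Char Int),
        (l.foldl (fun d c => d.insert c (d.getD c 0 + 1)) d)
          = (l.foldl (fun d c => d.modify c 0 (· + 1)) d) := by
      intro l
      induction l with
      | nil => intro d; rfl
      | cons c t iht => intro d; rw [List.foldl_cons, List.foldl_cons, insert_getD_eq_modify, iht]
    rw [hstep, PySem.Dict.getD_foldl_modify_add_one]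
    by_cases h : ch ∈ s.toList
    · have hm : ch ∈ PySem.List.dedup s.toList := by rw [PySem.List.mem_dedup]; exact h
      have h1 : (PySem.List.dedup s.toList).count ch = 1 :=
        List.count_eq_one_of_mem (PySem.List.nodup_dedup _) hm
      have hcon : s.toList.contains ch = true := by simpa using h
      rw [h1, hcon]
      simp
      ring
    · have h0 : (PySem.List.dedup s.toList).count ch = 0 := by
        rw [List.count_eq_zero, PySem.List.mem_dedup]; exact h
      have hcon : s.toList.contains ch = false := by simpa using h
      rw [h0, hcon]
      simp

-- A's found-loop computes the same count
lemma found_eq_countP (signals : List String) (letter : Char) :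
    (signals.foldl (fun found s => if s.toList.contains letter then found + 1 else found) (0 : Int))
      = (signals.countP (fun s => s.toList.contains letter) : Int) := by
  rw [PySem.List.foldl_count_if]; ring

-- ===== VERDICT (by name: the statement is the Claim_ definition above) =====
theorem is_digit_2_spec : Claim_equal_is_digit_2 := by
  intro string signals _
  unfold Spec_is_digit_2 is_digit_2 is_digit_2_alt
  simp only [List.any_eq, found_eq_countP, counts_getD]
  simp [PySem.Dict.getD]
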